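-- pv_equiv track=rewrite | github.com/Feddakalkun/comfyuifeddafront | backend/server.py | _pick_default_chat_model
-- ===== SOURCE A (Python) =====
-- def _is_vision_model_name(model_name: str) -> bool:
--     lowered = (model_name or "").lower()
--     return any(k in lowered for k in ["vision", "llava", "joycaption", "moondream", "minicpm-v"])
--
-- def _pick_default_chat_model(available_models: list[str]) -> str:
--     if not available_models:
--         return ""
--     non_vision = [m for m in available_models if not _is_vision_model_name(m)]
--     candidates = non_vision if non_vision else available_models
--     preferred_order = [
--         "qwen2.5",
--         "qwen",
--         "llama3.2",
--         "llama",
--         "gpt-oss",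
--         "dolphin",
--     ]
--     lowered = [(m, m.lower()) for m in candidates]
--     for pref in preferred_order:
--         for original, low in lowered:
--             if pref in low:
--                 return original
--     return candidates[0]
-- ===== SOURCE B (Python) =====
-- _PREFERRED_ORDER = ["qwen2.5", "qwen", "llama3.2", "llama", "gpt-oss", "dolphin"]
--
-- def _is_vision_model_name(model_name: str) -> bool:
--     lowered = (model_name or "").lower()
--     return any(k in lowered for k in ["vision", "llava", "joycaption", "moondream", "minicpm-v"])
--
-- def _rank(model: str) -> int:
--     low = model.lower()
--     for i, pref in enumerate(_PREFERRED_ORDER):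
--         if pref in low:
--             return i
--     return len(_PREFERRED_ORDER)
--
-- def _pick_default_chat_model(available_models: list[str]) -> str:
--     if not available_models:
--         return ""
--     non_vision = [m for m in available_models if not _is_vision_model_name(m)]
--     candidates = non_vision or available_models
--     return min(candidates, key=_rank)
-- ===== Notes on version B (the rewrite author's own statement) =====
-- stated objective: alternative
-- what changed: Replaced the preference-major nested loops with early return by a single candidate-major pass: each candidate gets a rank (index of its first matching preference keyword, or the list length if none), and min(candidates, key=rank) picks the first candidate of minimal rank.
import Mathlib
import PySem

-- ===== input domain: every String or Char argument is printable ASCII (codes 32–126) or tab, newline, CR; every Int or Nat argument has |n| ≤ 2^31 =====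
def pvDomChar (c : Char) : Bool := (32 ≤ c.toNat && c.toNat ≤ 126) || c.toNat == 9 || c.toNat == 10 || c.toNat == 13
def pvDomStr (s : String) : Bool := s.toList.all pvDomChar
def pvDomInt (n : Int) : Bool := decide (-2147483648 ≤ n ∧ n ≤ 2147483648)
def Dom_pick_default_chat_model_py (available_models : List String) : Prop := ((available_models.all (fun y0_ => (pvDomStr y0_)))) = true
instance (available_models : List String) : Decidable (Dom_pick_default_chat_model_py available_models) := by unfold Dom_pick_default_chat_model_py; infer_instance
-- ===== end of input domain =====

-- B replaces the preference-major nested loops by one candidate-major argmin over a per-candidate rank (objective: alternative decomposition, same cost).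

-- ===== PORT A =====
def pv_is_vision (model_name : String) : Bool :=
  let lowered := PySem.Str.lower model_name
  (["vision", "llava", "joycaption", "moondream", "minicpm-v"] : List String).any
    (fun k => PySem.Str.isIn k lowered)

-- inner loop: 'for original, low in lowered: if pref in low: return original'
def pvInnerA (pref : String) : List (String × String) → Option String
  | [] => none
  | (original, low) :: rest =>
      if PySem.Str.isIn pref low then some original else pvInnerA pref rest

-- outer loop over preferred_order with early return
def pvOuterA (lowered : List (String × String)) : List String → Option String
  | [] => none
  | pref :: rest =>
      match pvInnerA pref lowered with
      | some r => some r
      | none => pvOuterA lowered rest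

def pick_default_chat_model_py (available_models : List String) : String :=
  match available_models with
  | [] => ""
  | _ =>
    let non_vision := available_models.filter (fun m => !pv_is_vision m)
    let candidates := if non_vision = [] then available_models else non_vision
    let preferred_order : List String :=
      ["qwen2.5", "qwen", "llama3.2", "llama", "gpt-oss", "dolphin"]
    let lowered := candidates.map (fun m => (m, PySem.Str.lower m))
    match pvOuterA lowered preferred_order with
    | some r => r
    | none => candidates.headD ""   -- candidates[0]; candidates is nonempty here

-- ===== PORT B =====
def pv_is_vision_alt (model_name : String) : Bool :=
  let lowered := PySem.Str.lower model_name
  (["vision", "llava", "joycaption", "moondream", "minicpm-v"] : List String).any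
    (fun k => PySem.Str.isIn k lowered)

def pvPreferredOrder : List String :=
  ["qwen2.5", "qwen", "llama3.2", "llama", "gpt-oss", "dolphin"]

-- _rank: index of the first preference that is a substring of low, else length
def pvRankFrom (low : String) : List String → Nat
  | [] => 0
  | pref :: rest => if PySem.Str.isIn pref low then 0 else 1 + pvRankFrom low rest

def pvRank (model : String) : Nat :=
  pvRankFrom (PySem.Str.lower model) pvPreferredOrder

def pick_default_chat_model_py_alt (available_models : List String) : String :=
  if available_models.isEmpty then ""
  else
    let non_vision := available_models.filter (fun m => !pv_is_vision_alt m)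
    let candidates := if non_vision = [] then available_models else non_vision
    (PySem.List.min? candidates pvRank).getD ""

-- ===== PRECONDITION & SPEC =====
def Spec_pick_default_chat_model_py (available_models : List String) (out : String) : Prop := out = pick_default_chat_model_py_alt available_models
instance (available_models : List String) (out : String) : Decidable (Spec_pick_default_chat_model_py available_models out) := by unfold Spec_pick_default_chat_model_py; infer_instance

-- ===== CLAIM (what is proved, stated in full; the proofs are below) =====
def Claim_equal_pick_default_chat_model_py : Prop := ∀ (available_models : List String), Dom_pick_default_chat_model_py available_models → Spec_pick_default_chat_model_py available_models (pick_default_chat_model_py available_models)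

-- ===== LEMMAS AND PROOFS =====

theorem pv_vision_helpers_eq : pv_is_vision = pv_is_vision_alt := by
  funext m
  rfl

-- abbreviation for min?'s folding step with a Nat key
def pvStep (key : String → Nat) (acc : Option String) (x : String) : Option String :=
  match acc with
  | none => some x
  | some m => if key x < key m then some x else some m

theorem pv_min?_eq_foldl (key : String → Nat) (c : List String) :
    PySem.List.min? c key = c.foldl (pvStep key) none := by
  unfold PySem.List.min?
  congr 1
  funext acc x
  cases acc <;> rfl

-- once the accumulator has key 0 it never changes
theorem pv_foldl_zero_fixed (key : String → Nat) (t : List String) (m : String)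
    (hm : key m = 0) : t.foldl (pvStep key) (some m) = some m := by
  induction t with
  | nil => rfl
  | cons b t ih => simp [pvStep, hm, ih]

-- the fold lands on the first element of key 0, from any nonzero-key accumulator
theorem pv_foldl_find_zero (key : String → Nat) (t : List String) :
    ∀ (x m : String), key m ≠ 0 → t.find? (fun y => key y == 0) = some x →
    t.foldl (pvStep key) (some m) = some x := by
  induction t with
  | nil => intro x m _ hf; simp at hf
  | cons b t ih =>
    intro x m hm hf
    by_cases hb : key b = 0
    · have hx : b = x := by simpa [List.find?, hb] using hf
      subst hx
      have hlt : key b < key m := by omega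
      rw [List.foldl_cons]
      have hstep : pvStep key (some m) b = some b := by simp [pvStep, hlt]
      rw [hstep]
      exact pv_foldl_zero_fixed key t b hb
    · have hbe : (key b == 0) = false := by simpa using hb
      have hf' : t.find? (fun y => key y == 0) = some x := by
        simpa [List.find?, hbe] using hf
      by_cases hlt : key b < key m
      · have hstep : pvStep key (some m) b = some b := by simp [pvStep, hlt]
        rw [List.foldl_cons, hstep]
        exact ih x b hb hf'
      · have hstep : pvStep key (some m) b = some m := by simp [pvStep, hlt]
        rw [List.foldl_cons, hstep]
        exact ih x m hm hf'

theorem pv_min?_find_zero (key : String → Nat) (c : List String) (x : String)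
    (hf : c.find? (fun y => key y == 0) = some x) :
    PySem.List.min? c key = some x := by
  rw [pv_min?_eq_foldl]
  cases c with
  | nil => simp at hf
  | cons a t =>
    by_cases ha : key a = 0
    · have hx : a = x := by simpa [List.find?, ha] using hf
      subst hx
      rw [List.foldl_cons]
      have hstep : pvStep key none a = some a := rfl
      rw [hstep]
      exact pv_foldl_zero_fixed key t a ha
    · have hae : (key a == 0) = false := by simpa using ha
      have hf' : t.find? (fun y => key y == 0) = some x := by
        simpa [List.find?, hae] using hf
      rw [List.foldl_cons]
      have hstep : pvStep key none a = some a := rfl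
      rw [hstep]
      exact pv_foldl_find_zero key t x a ha hf'

-- min? only depends on key values on members
theorem pv_foldl_congr (f g : String → Nat) (c : List String) (acc : Option String)
    (hm : ∀ x ∈ c, f x = g x) (ha : ∀ m, acc = some m → f m = g m) :
    c.foldl (pvStep f) acc = c.foldl (pvStep g) acc := by
  induction c generalizing acc with
  | nil => rfl
  | cons x t ih =>
    have hx : f x = g x := hm x (by simp)
    have hstep : pvStep f acc x = pvStep g acc x := by
      cases acc with
      | none => rfl
      | some m => simp [pvStep, hx, ha m rfl]
    rw [List.foldl_cons, List.foldl_cons, hstep]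
    refine ih (pvStep g acc x) (fun y hy => hm y (by simp [hy])) ?_
    intro m hmm
    cases acc with
    | none =>
      have hxm : x = m := Option.some.inj hmm
      subst hxm
      exact hx
    | some m0 =>
      have hm0 := ha m0 rfl
      by_cases hlt : g x < g m0
      · have h2 : x = m := by
          have : pvStep g (some m0) x = some x := by simp [pvStep, hlt]
          rw [this] at hmm
          exact Option.some.inj hmm
        subst h2; exact hx
      · have h2 : m0 = m := by
          have : pvStep g (some m0) x = some m0 := by simp [pvStep, hlt]
          rw [this] at hmm
          exact Option.some.inj hmm
        subst h2; exact hm0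

theorem pv_min?_congr (f g : String → Nat) (c : List String)
    (hm : ∀ x ∈ c, f x = g x) :
    PySem.List.min? c f = PySem.List.min? c g := by
  rw [pv_min?_eq_foldl, pv_min?_eq_foldl]
  exact pv_foldl_congr f g c none hm (by intro m h; cases h)

-- shifting every key by +1 does not change the argmin
theorem pv_min?_succ (f : String → Nat) (c : List String) :
    PySem.List.min? c (fun x => 1 + f x) = PySem.List.min? c f := by
  rw [pv_min?_eq_foldl, pv_min?_eq_foldl]
  have : pvStep (fun x => 1 + f x) = pvStep f := by
    funext acc x
    cases acc with
    | none => rfl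
    | some m => simp [pvStep]
  rw [this]

-- constant-zero key: min? is the head
theorem pv_min?_zero_head (c : List String) (a : String) (t : List String)
    (hc : c = a :: t) : PySem.List.min? c (fun _ => (0 : Nat)) = some a := by
  subst hc
  exact pv_min?_find_zero (fun _ => 0) (a :: t) a (by simp [List.find?])

-- the inner loop is find? over the candidates
theorem pv_innerA_find (pref : String) (c : List String) :
    pvInnerA pref (c.map (fun m => (m, PySem.Str.lower m)))
      = c.find? (fun m => PySem.Str.isIn pref (PySem.Str.lower m)) := by
  induction c with
  | nil => rfl
  | cons a t ih =>
    by_cases h : PySem.Chars.isIn pref.toList (PySem.Chars.lower a.toList)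
    · simp [pvInnerA, List.find?, h]
    · simp [pvInnerA, List.find?, h, ih]

-- MAIN: preference-major scan with head fallback = argmin of rank, for any preference list
theorem pv_main (prefs : List String) (c : List String) (a : String) (t : List String)
    (hc : c = a :: t) :
    (match pvOuterA (c.map (fun m => (m, PySem.Str.lower m))) prefs with
     | some r => r
     | none => c.headD "")
      = (PySem.List.min? c (fun m => pvRankFrom (PySem.Str.lower m) prefs)).getD "" := by
  induction prefs generalizing c a t with
  | nil =>
    subst hc
    have h0 : PySem.List.min? (a :: t) (fun m => pvRankFrom (PySem.Str.lower m) []) = some a := by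
      simpa [pvRankFrom] using pv_min?_zero_head (a :: t) a t rfl
    simp [pvOuterA, h0]
  | cons p rest ih =>
    by_cases hex : ∃ x, c.find? (fun m => PySem.Str.isIn p (PySem.Str.lower m)) = some x
    · rcases hex with ⟨x, hx⟩
      have houter : pvOuterA (c.map (fun m => (m, PySem.Str.lower m))) (p :: rest) = some x := by
        rw [pvOuterA, pv_innerA_find, hx]
      have hfind0 : c.find?
          (fun y => pvRankFrom (PySem.Str.lower y) (p :: rest) == 0) = some x := by
        have : (fun y => pvRankFrom (PySem.Str.lower y) (p :: rest) == 0)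
            = (fun m => PySem.Str.isIn p (PySem.Str.lower m)) := by
          funext y
          by_cases h : PySem.Chars.isIn p.toList (PySem.Chars.lower y.toList) <;>
            simp [pvRankFrom, h]
        rw [this]; exact hx
      have hmin := pv_min?_find_zero _ c x hfind0
      simp [houter, hmin]
    · push_neg at hex
      have hnone : c.find? (fun m => PySem.Str.isIn p (PySem.Str.lower m)) = none := by
        cases h : c.find? (fun m => PySem.Str.isIn p (PySem.Str.lower m)) with
        | none => rfl
        | some x => exact absurd h (hex x)
      have hall : ∀ m ∈ c, PySem.Str.isIn p (PySem.Str.lower m) = false := by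
        intro m hmem
        have h := List.find?_eq_none.mp hnone m hmem
        revert h
        cases PySem.Str.isIn p (PySem.Str.lower m) <;> simp
      have houter : pvOuterA (c.map (fun m => (m, PySem.Str.lower m))) (p :: rest)
          = pvOuterA (c.map (fun m => (m, PySem.Str.lower m))) rest := by
        rw [pvOuterA, pv_innerA_find, hnone]
      have hkey : PySem.List.min? c (fun m => pvRankFrom (PySem.Str.lower m) (p :: rest))
          = PySem.List.min? c (fun m => pvRankFrom (PySem.Str.lower m) rest) := by
        have h1 : PySem.List.min? c (fun m => pvRankFrom (PySem.Str.lower m) (p :: rest))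
            = PySem.List.min? c (fun m => 1 + pvRankFrom (PySem.Str.lower m) rest) := by
          refine pv_min?_congr _ _ c ?_
          intro m hmem
          simp only [pvRankFrom, hall m hmem, Bool.false_eq_true, if_false]
        rw [h1, pv_min?_succ]
      rw [houter, hkey]
      exact ih c a t hc

-- ===== VERDICT (by name: the statement is the Claim_ definition above) =====
theorem pick_default_chat_model_py_spec : Claim_equal_pick_default_chat_model_py := by
  unfold Claim_equal_pick_default_chat_model_py
  intro available_models _
  unfold Spec_pick_default_chat_model_py
  cases available_models with
  | nil => rfl
  | cons a0 t0 =>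
    unfold pick_default_chat_model_py pick_default_chat_model_py_alt
    simp only [List.isEmpty_cons, Bool.false_eq_true, if_false]
    rw [pv_vision_helpers_eq]
    set nv := (a0 :: t0).filter (fun m => !pv_is_vision_alt m) with hnv
    by_cases h : nv = []
    · simp only [h]
      exact pv_main pvPreferredOrder (a0 :: t0) a0 t0 rfl
    · rcases List.exists_cons_of_ne_nil h with ⟨b, t1, hb⟩
      simp only [if_neg h]
      exact pv_main pvPreferredOrder nv b t1 hb
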